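-- pv_equiv track=rewrite | github.com/haqueabida/MP-SPDZ | Compiler/bitonic.py | bitoniccomps
-- ===== SOURCE A (Python) =====
-- def bitoniccomps(n):
--     '''
--
--
--     Parameters
--     ----------
--     n : length (a power of 2)
--
--     Checks the indices to see if the XOR is off by the right amount
--     This yields the pairs we will eventually want to compare for bitonic merge
--     (in order)
--
--     Returns
--     -------
--     comp_tuples : a list of tuples
--
--     '''
--     numofbits = n.bit_length()-1
--     comp_tuples = []
--
--     powof2 = list(map(lambda x: 2**x, range(numofbits)))
--
--     for k in powof2[::-1]:
--         for i in range(n-1):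
--             for j in range(i+1, n):
--                 if i^j == k:
--                     comp_tuples.append((i,j))
--
--     return comp_tuples
-- ===== SOURCE B (Python) =====
-- def bitoniccomps(n):
--     # For each power of 2 (descending) compute the partner j = i ^ k directly:
--     # O(n log n) instead of scanning all pairs.
--     numofbits = n.bit_length() - 1
--     comp_tuples = []
--     for t in range(numofbits - 1, -1, -1):
--         k = 1 << t
--         for i in range(n):
--             j = i ^ k
--             if i < j < n:
--                 comp_tuples.append((i, j))
--     return comp_tuples
-- ===== Notes on version B (the rewrite author's own statement) =====
-- stated objective: faster
-- what changed: Instead of scanning all pairs (i,j) with i<j for each power of two, B computes the unique partner j = i XOR k directly for each i and appends it when i < j < n, removing the inner quadratic scan.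
import Mathlib
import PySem

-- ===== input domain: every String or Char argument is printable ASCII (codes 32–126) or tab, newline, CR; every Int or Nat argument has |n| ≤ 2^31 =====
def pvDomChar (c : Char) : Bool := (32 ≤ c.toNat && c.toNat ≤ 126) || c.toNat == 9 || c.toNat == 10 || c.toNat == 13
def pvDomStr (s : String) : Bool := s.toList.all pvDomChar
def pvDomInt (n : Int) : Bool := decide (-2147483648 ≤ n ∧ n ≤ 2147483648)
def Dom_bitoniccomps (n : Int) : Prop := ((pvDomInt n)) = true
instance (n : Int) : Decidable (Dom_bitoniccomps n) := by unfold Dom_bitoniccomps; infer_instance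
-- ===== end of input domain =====

-- B replaces A's inner pair scan by computing the unique partner j = i XOR k directly
-- for each i (appending when i < j < n): an asymptotically faster exact re-implementation.

-- ===== PORT A =====
def bitoniccomps (n : Int) : List (Int × Int) :=
  let numofbits : Int := (PySem.Int.bitLength n : Int) - 1
  -- powof2 = list(map(lambda x: 2**x, range(numofbits))); x ≥ 0 inside the range, so 2**x = 2 ^ x.toNat exactly
  let powof2 : List Int := (PySem.List.pyRange 0 numofbits 1).map (fun x => (2 : Int) ^ x.toNat)
  -- powof2[::-1] — slice? with step -1 never raises (getD is unreachable)
  ((PySem.List.slice? powof2 none none (-1)).getD []).foldl (fun acc k =>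
    (PySem.List.pyRange 0 (n - 1) 1).foldl (fun acc i =>
      (PySem.List.pyRange (i + 1) n 1).foldl (fun acc j =>
        if PySem.Int.bxor i j = k then acc ++ [(i, j)] else acc) acc) acc) []

-- ===== PORT B =====
def bitoniccomps_alt (n : Int) : List (Int × Int) :=
  let numofbits : Int := (PySem.Int.bitLength n : Int) - 1
  (PySem.List.pyRange (numofbits - 1) (-1) (-1)).foldl (fun acc t =>
    -- t ≥ 0 inside the countdown range, so 1 << t = (1 : Int) <<< t.toNat exactly
    let k : Int := (1 : Int) <<< t.toNat
    (PySem.List.pyRange 0 n 1).foldl (fun acc i =>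
      let j := PySem.Int.bxor i k
      if i < j ∧ j < n then acc ++ [(i, j)] else acc) acc) []

-- ===== PRECONDITION & SPEC =====
def Spec_bitoniccomps (n : Int) (out : List (Int × Int)) : Prop := out = bitoniccomps_alt n
instance (n : Int) (out : List (Int × Int)) : Decidable (Spec_bitoniccomps n out) := by unfold Spec_bitoniccomps; infer_instance

-- ===== CLAIM (what is proved, stated in full; the proofs are below) =====
def Claim_equal_bitoniccomps : Prop := ∀ (n : Int), Dom_bitoniccomps n → Spec_bitoniccomps n (bitoniccomps n)

-- ===== LEMMAS AND PROOFS =====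

-- xor cancellation on nonnegative Ints (Python's ^ on the indices that occur here)
lemma bxor_eq_iff (i j k : Int) (hi : 0 ≤ i) (hj : 0 ≤ j) (hk : 0 ≤ k) :
    PySem.Int.bxor i j = k ↔ j = PySem.Int.bxor i k := by
  lift i to ℕ using hi
  lift j to ℕ using hj
  lift k to ℕ using hk
  simp only [PySem.Int.bxor_natCast, Int.natCast_inj]
  constructor
  · intro h; rw [← h, Nat.xor_xor_cancel_left]
  · intro h; rw [h, Nat.xor_xor_cancel_left]

-- A's inner scan over j ∈ range(i+1, n) appends exactly the pair B computes directly
lemma inner_scan_eq (n k i : Int) (hi : 0 ≤ i) (hk : 0 ≤ k) (acc : List (Int × Int)) :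
    (PySem.List.pyRange (i + 1) n 1).foldl (fun acc j =>
        if PySem.Int.bxor i j = k then acc ++ [(i, j)] else acc) acc
    = (if i < PySem.Int.bxor i k ∧ PySem.Int.bxor i k < n
        then acc ++ [(i, PySem.Int.bxor i k)] else acc) := by
  set j0 := PySem.Int.bxor i k with hj0
  have hbody : (fun (acc : List (Int × Int)) j =>
      if PySem.Int.bxor i j = k then acc ++ [(i, j)] else acc)
      = (fun acc j => if (decide (PySem.Int.bxor i j = k)) = true
          then acc ++ [((fun j => (i, j)) j)] else acc) := by
    funext acc j; simp
  rw [hbody, PySem.List.foldl_append_if (fun j => decide (PySem.Int.bxor i j = k)) (fun j => (i, j))]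
  have hfil : (PySem.List.pyRange (i + 1) n 1).filter (fun j => decide (PySem.Int.bxor i j = k))
      = if i < j0 ∧ j0 < n then [j0] else [] := by
    have hcongr : (PySem.List.pyRange (i + 1) n 1).filter (fun j => decide (PySem.Int.bxor i j = k))
        = (PySem.List.pyRange (i + 1) n 1).filter (fun j => j = j0) := by
      apply List.filter_congr
      intro j hj
      have hmem := (PySem.List.mem_pyRange_one).1 hj
      simp only [decide_eq_decide]
      exact bxor_eq_iff i j k hi (by omega) hk
    rw [hcongr]
    by_cases hc : i < j0 ∧ j0 < n
    · rw [if_pos hc]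
      have hmem : j0 ∈ PySem.List.pyRange (i + 1) n 1 :=
        (PySem.List.mem_pyRange_one).2 (by omega)
      have hnd : (PySem.List.pyRange (i + 1) n 1).Nodup := PySem.List.nodup_pyRange_one _ _
      have hbe : (PySem.List.pyRange (i + 1) n 1).filter (fun j => j = j0)
          = (PySem.List.pyRange (i + 1) n 1).filter (fun j => j == j0) := rfl
      rw [hbe, List.filter_beq, List.count_eq_one_of_mem hnd hmem, List.replicate_one]
    · rw [if_neg hc]
      apply List.filter_eq_nil_iff.2
      intro j hj
      have hmem := (PySem.List.mem_pyRange_one).1 hj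
      simp only [decide_eq_true_eq]
      intro h; subst h; omega
  rw [hfil]
  by_cases hc : i < j0 ∧ j0 < n
  · rw [if_pos hc, if_pos hc]; simp
  · rw [if_neg hc, if_neg hc]; simp

-- for a fixed k ≥ 1, A's double scan over i < j equals B's single pass over i
lemma middle_eq (n k : Int) (hk : 1 ≤ k) (acc : List (Int × Int)) :
    (PySem.List.pyRange 0 (n - 1) 1).foldl (fun acc i =>
        (PySem.List.pyRange (i + 1) n 1).foldl (fun acc j =>
          if PySem.Int.bxor i j = k then acc ++ [(i, j)] else acc) acc) acc
    = (PySem.List.pyRange 0 n 1).foldl (fun acc i =>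
        let j := PySem.Int.bxor i k
        if i < j ∧ j < n then acc ++ [(i, j)] else acc) acc := by
  have hA : (PySem.List.pyRange 0 (n - 1) 1).foldl (fun acc i =>
        (PySem.List.pyRange (i + 1) n 1).foldl (fun acc j =>
          if PySem.Int.bxor i j = k then acc ++ [(i, j)] else acc) acc) acc
      = (PySem.List.pyRange 0 (n - 1) 1).foldl (fun acc i =>
          let j := PySem.Int.bxor i k
          if i < j ∧ j < n then acc ++ [(i, j)] else acc) acc := by
    apply PySem.List.foldl_congr_mem
    intro a i hi
    have hmem := (PySem.List.mem_pyRange_one).1 hi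
    exact inner_scan_eq n k i (by omega) (by omega) a
  rw [hA]
  by_cases hn : 1 ≤ n
  · have hsplit : PySem.List.pyRange 0 n 1
        = PySem.List.pyRange 0 (n - 1) 1 ++ [n - 1] := by
      have h1 : n = (n - 1) + 1 := by omega
      rw [h1, PySem.List.pyRange_one_succ_right (by omega : (0:Int) ≤ n - 1)]
      rw [← h1]
    rw [hsplit, List.foldl_append]
    simp only [List.foldl_cons, List.foldl_nil]
    have hno : ¬ (n - 1 < PySem.Int.bxor (n - 1) k ∧ PySem.Int.bxor (n - 1) k < n) := by
      intro ⟨h1, h2⟩; omega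
    simp only [if_neg hno]
  · rw [PySem.List.pyRange_one_eq_nil (by omega), PySem.List.pyRange_one_eq_nil (by omega)]

-- ===== VERDICT (by name: the statement is the Claim_ definition above) =====
theorem bitoniccomps_spec : Claim_equal_bitoniccomps := by
  intro n _
  simp only [Spec_bitoniccomps, bitoniccomps, bitoniccomps_alt,
    PySem.List.slice?_none_none_neg_one, Option.getD_some]
  set m : Int := (PySem.Int.bitLength n : Int) - 1 with hm
  rw [← List.map_reverse, List.foldl_map]
  have hrev : (PySem.List.pyRange 0 m 1).reverse = PySem.List.pyRange (m - 1) (-1) (-1) := by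
    rw [PySem.List.pyRange_neg_one_eq_reverse]
    congr 1
    norm_num
  rw [hrev]
  apply PySem.List.foldl_congr_mem
  intro acc t ht
  simp only [Int.one_shiftLeft]
  push_cast
  exact middle_eq n _ (one_le_pow₀ (by norm_num)) acc
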